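-- pv_equiv track=rewrite | github.com/akriticg/Google_Interview_Prep | snapshot_2.py | solution
-- ===== SOURCE A (Python) =====
-- def solution(stores, houses):
--
--     distance = {}
--     output = [1000000] * len(houses)
--
--     for k in range(len(houses)):
--         individual_dist = []
--         for j in range(len(stores)):
--             individual_dist.append(abs(houses[k] - stores[j]))
--
--         distance[houses[k]] = individual_dist
--
--     for l in range(len(output)):
--         k = distance[houses[l]]
--         for j in range(len(k)):
--
--             if k[j] == output[l]:
--                 if stores[j] < stores[key]:
--                     output[l] = k[j]
--                     key = j
--
--             if k[j] < output[l]: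
--                 output[l] = k[j]
--                 key = j
--
--         output[l] = stores[key]
--
--     return output
-- ===== SOURCE B (Python) =====
-- def solution(stores, houses):
--     s = sorted(stores)
--     out = []
--     for h in houses:
--         lo, hi = 0, len(s)
--         while lo < hi:
--             mid = (lo + hi) // 2
--             if s[mid] < h:
--                 lo = mid + 1
--             else:
--                 hi = mid
--         if lo == 0:
--             out.append(s[0])
--         elif lo == len(s):
--             out.append(s[-1])
--         else:
--             left, right = s[lo - 1], s[lo]
--             out.append(left if h - left <= right - h else right)
--     return out
-- ===== Notes on version B (the rewrite author's own statement) =====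
-- stated objective: faster
-- what changed: B sorts the stores once and binary-searches each house's insertion point, comparing only the two neighbouring stores (tie to the smaller value), instead of A's dict of per-house distance lists and full scan of every store per house with a 1000000 sentinel; Pre_ excludes inputs where A raises UnboundLocalError and inputs where some house lies at distance >= 1000000 from every store, where A's sentinel is never properly beaten and A returns the store it selected for an earlier house -- leftover loop state that no independent re-implementation can match.
-- outside the precondition, e.g. on solution([0, 5000000], [1, 4000000]): A returns [0, 0], B returns [0, 5000000]; on solution([404, 404, 404], [4, -2147483648]): A returns [404, 404], B returns [404, 404]
import Mathlib
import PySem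

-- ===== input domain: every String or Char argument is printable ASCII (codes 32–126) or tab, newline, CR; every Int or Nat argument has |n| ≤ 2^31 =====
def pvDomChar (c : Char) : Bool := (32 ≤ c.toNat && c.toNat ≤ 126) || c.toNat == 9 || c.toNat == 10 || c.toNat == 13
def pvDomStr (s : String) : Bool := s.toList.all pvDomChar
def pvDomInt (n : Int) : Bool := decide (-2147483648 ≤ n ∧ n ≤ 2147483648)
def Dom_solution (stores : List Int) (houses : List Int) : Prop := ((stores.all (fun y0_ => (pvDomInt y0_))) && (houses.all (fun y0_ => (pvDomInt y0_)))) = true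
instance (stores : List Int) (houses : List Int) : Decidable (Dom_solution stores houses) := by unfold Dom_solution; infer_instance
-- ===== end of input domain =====

-- B replaces A's per-house scan over every store (with its 1000000 sentinel and a 'key'
-- leaking across houses) by sort-once + binary-search-per-house with the same tie-break
-- (smaller store value); equivalence is claimed on the return value only.

-- ===== PORT A =====

-- abs(x)
def pyAbs (x : Int) : Int := if x < 0 then -x else x

-- inner list build: 'for j in range(len(stores)): individual_dist.append(abs(h - stores[j]))'
def distList (h : Int) (stores : List Int) : List Int :=
  (PySem.List.pyRange 0 (stores.length : Int) 1).foldl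
    (fun acc j => acc ++ [pyAbs (h - PySem.List.pyGetD stores j 0)]) []

-- one iteration j of A's inner loop; state = (output[l], key).
-- output[l] is the only list cell the inner loop reads or writes, so it is threaded
-- as a scalar.  The 'none' branches are where Python hits the unbound 'key'
-- (UnboundLocalError) — excluded by Pre_solution.
def innerStep (stores k : List Int) (st : Int × Option Nat) (j : Nat) : Int × Option Nat :=
  let kj := PySem.List.pyGetD k (j : Int) 0
  let st1 :=
    if kj = st.1 then
      match st.2 with
      | some key =>
          if PySem.List.pyGetD stores (j : Int) 0 < PySem.List.pyGetD stores (key : Int) 0 then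
            (kj, some j)
          else (st.1, some key)
      | none => st                      -- Python raises UnboundLocalError here
    else st
  if kj < st1.1 then (kj, some j) else st1

-- 'for j in range(len(k)): …'
def houseLoop (stores k : List Int) (st : Int × Option Nat) : Int × Option Nat :=
  (List.range k.length).foldl (innerStep stores k) st

def solution (stores : List Int) (houses : List Int) : List Int :=
  -- distance[houses[k]] = individual_dist
  let distance : PySem.Dict Int (List Int) :=
    houses.foldl (fun d h => d.insert h (distList h stores)) PySem.Dict.empty
  let n := houses.length
  -- output = [1000000] * len(houses); 'for l in range(len(output)): …'
  let step := fun (st : List Int × Option Nat) (l : Nat) =>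
    let output := st.1
    let h := PySem.List.pyGetD houses (l : Int) 0
    let k := distance.getD h []
    let r := houseLoop stores k (PySem.List.pyGetD output (l : Int) 0, st.2)
    let finalv :=
      match r.2 with
      | some key => PySem.List.pyGetD stores (key : Int) 0   -- output[l] = stores[key]
      | none => 0                        -- Python raises UnboundLocalError here
    (output.set l finalv, r.2)
  ((List.range n).foldl step (List.replicate n 1000000, none)).1

-- ===== PORT B =====

-- 'while lo < hi: mid = (lo+hi)//2; …'  (lo, hi ≥ 0, so '//2' is Nat division;
-- the loop is written structurally on the fuel hi - lo, its termination measure)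
def bsGo (s : List Int) (h : Int) : Nat → Nat → Nat → Nat
  | 0, lo, _ => lo
  | fuel + 1, lo, hi =>
    if lo < hi then
      let mid := (lo + hi) / 2
      if PySem.List.pyGetD s (mid : Int) 0 < h then bsGo s h fuel (mid + 1) hi
      else bsGo s h fuel lo mid
    else lo

def bsLoop (s : List Int) (h : Int) (lo hi : Nat) : Nat := bsGo s h (hi - lo) lo hi

-- body of B's per-house branch chain
def nearestOf (s : List Int) (h : Int) : Int :=
  let lo := bsLoop s h 0 s.length
  if lo = 0 then PySem.List.pyGetD s 0 0                       -- s[0]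
  else if lo = s.length then PySem.List.pyGetD s (-1) 0        -- s[-1]
  else
    let left := PySem.List.pyGetD s ((lo : Int) - 1) 0
    let right := PySem.List.pyGetD s (lo : Int) 0
    if h - left ≤ right - h then left else right

def solution_alt (stores : List Int) (houses : List Int) : List Int :=
  let s := PySem.List.sorted stores (fun x => x) false    -- sorted(stores)
  houses.map (fun h => nearestOf s h)

-- ===== PRECONDITION & SPEC =====

-- |h - stores[i]|, the distance A computes for store index i
def dA (h : Int) (stores : List Int) (i : Nat) : Int := pyAbs (h - stores.getD i 0)

-- A's scan of the first house never consults the still-unbound 'key': some store at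
-- distance < 1000000 appears before any store at distance ≥ 1000000.
def GoodFirst (h : Int) (stores : List Int) : Prop :=
  ∃ j, j < stores.length ∧ dA h stores j < 1000000 ∧
    ∀ i < j, 1000000 < dA h stores i

-- Pre_ excludes (i) inputs where A raises UnboundLocalError (empty stores, or a first
-- house whose scan reads 'key' before it is ever assigned), and (ii) inputs where some
-- house lies at distance ≥ 1000000 from every store: there A's 1000000 sentinel is never
-- properly beaten and A returns for that house the store it selected for an EARLIER house
-- (leftover loop state, not a function of that house) — a value no independent
-- re-implementation can match.
def Pre_solution (stores : List Int) (houses : List Int) : Prop :=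
  houses = [] ∨ (GoodFirst (houses.getD 0 0) stores ∧
    ∀ l, l < houses.length → ∃ s ∈ stores, pyAbs (houses.getD l 0 - s) < 1000000)

instance (stores : List Int) (houses : List Int) : Decidable (Pre_solution stores houses) := by
  unfold Pre_solution GoodFirst dA; infer_instance

def pvWitness_solution : List Int × List Int := ([2, 7], [3, 9])

def Spec_solution (stores : List Int) (houses : List Int) (out : List Int) : Prop :=
  out = solution_alt stores houses
instance (stores : List Int) (houses : List Int) (out : List Int) : Decidable (Spec_solution stores houses out) := by unfold Spec_solution; infer_instance

-- ===== CLAIM (what is proved, stated in full; the proofs are below) =====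
def Claim_equal_solution : Prop := ∀ (stores : List Int) (houses : List Int), Dom_solution stores houses → Pre_solution stores houses → Spec_solution stores houses (solution stores houses)

-- ===== LEMMAS AND PROOFS =====

-- the (unique) intended answer for one house: nearest store, ties to the smaller value
def IsBest (stores : List Int) (h r : Int) : Prop :=
  r ∈ stores ∧ ∀ s ∈ stores,
    pyAbs (h - r) < pyAbs (h - s) ∨ (pyAbs (h - r) = pyAbs (h - s) ∧ r ≤ s)

lemma distList_eq (h : Int) (stores : List Int) :
    distList h stores = stores.map (fun s => pyAbs (h - s)) := by
  unfold distList
  rw [PySem.List.foldl_pyRange_zero_pyGetD' stores 0 (fun acc s => acc ++ [pyAbs (h - s)]) []]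
  rw [PySem.List.foldl_append_singleton_eq_map]
  simp

def ALoopInv (stores : List Int) (h : Int) (key0 : Option Nat) (m : Nat) (st : Int × Option Nat) : Prop :=
  (st.1 = 1000000 ∧ (∀ i, i < m → 1000000 ≤ dA h stores i) ∧
     (∀ k, st.2 = some k → k < stores.length) ∧
     (st.2 = none → key0 = none ∧ ∀ i, i < m → 1000000 < dA h stores i))
  ∨ (∃ k, k < m ∧ k < stores.length ∧ st.2 = some k ∧ st.1 = dA h stores k ∧ st.1 < 1000000 ∧
      ∀ i, i < m → st.1 < dA h stores i ∨ (st.1 = dA h stores i ∧ stores.getD k 0 ≤ stores.getD i 0))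

lemma hkj_eq (h : Int) (stores : List Int) (m : Nat) (hm : m < stores.length) :
    PySem.List.pyGetD (distList h stores) ((m : Nat) : Int) 0 = dA h stores m := by
  rw [PySem.List.pyGetD_natCast, distList_eq]
  rw [List.getD_eq_getElem _ _ (by simpa using hm), List.getElem_map]
  unfold dA
  rw [List.getD_eq_getElem _ _ hm]

lemma innerStep_some (stores ds : List Int) (v : Int) (k0 : Nat) (j : Nat) :
    innerStep stores ds (v, some k0) j =
      (let kj := PySem.List.pyGetD ds (j : Int) 0
       let st1 := if kj = v then
           (if PySem.List.pyGetD stores (j : Int) 0 < PySem.List.pyGetD stores (k0 : Int) 0 then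
             (kj, some j) else (v, some k0))
         else (v, some k0)
       if kj < st1.1 then (kj, some j) else st1) := rfl

lemma innerStep_none (stores ds : List Int) (v : Int) (j : Nat) :
    innerStep stores ds (v, none) j =
      (let kj := PySem.List.pyGetD ds (j : Int) 0
       let st1 := if kj = v then (v, none) else (v, none)
       if kj < st1.1 then (kj, some j) else st1) := rfl

lemma inv_step (stores : List Int) (h : Int) (key0 : Option Nat) (m : Nat)
    (hm : m < stores.length)
    (hgf : key0 = none → GoodFirst h stores)
    (st : Int × Option Nat) (hinv : ALoopInv stores h key0 m st) :
    ALoopInv stores h key0 (m + 1) (innerStep stores (distList h stores) st m) := by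
  obtain ⟨v, key⟩ := st
  rcases hinv with ⟨hv, hall, hkb, hnone⟩ | ⟨k, hkm, hkn, hkey, hv, hvlt, hmin⟩
  · simp only at hv hall hkb hnone
    subst hv
    cases key with
    | none =>
      rw [innerStep_none]
      simp only [hkj_eq h stores m hm]
      obtain ⟨hk0, hstrict⟩ := hnone rfl
      by_cases he : dA h stores m = 1000000
      · -- Python would raise here; impossible under GoodFirst
        exfalso
        obtain ⟨j, hj, hjlt, hjall⟩ := hgf hk0
        rcases Nat.lt_trichotomy j m with hc | hc | hc
        · have := hstrict j hc; omega
        · subst hc; omega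
        · have := hjall m hc; omega
      · rw [if_neg he]
        dsimp only
        by_cases hlt : dA h stores m < 1000000
        · rw [if_pos hlt]
          right
          refine ⟨m, by omega, hm, rfl, rfl, hlt, fun i hi => ?_⟩
          rcases Nat.lt_or_ge i m with hc | hc
          · have := hall i hc; left; omega
          · have : i = m := by omega
            subst this; right; exact ⟨rfl, le_refl _⟩
        · rw [if_neg hlt]
          left
          refine ⟨rfl, ?_, ?_, ?_⟩
          · intro i hi
            rcases Nat.lt_or_ge i m with hc | hc
            · exact hall i hc
            · have : i = m := by omega
              subst this; omega
          · intro k hk; cases hk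
          · intro _
            refine ⟨hk0, ?_⟩
            intro i hi
            rcases Nat.lt_or_ge i m with hc | hc
            · exact hstrict i hc
            · have : i = m := by omega
              subst this; omega
    | some k0 =>
      have hk0len : k0 < stores.length := hkb k0 rfl
      rw [innerStep_some]
      simp only [hkj_eq h stores m hm, PySem.List.pyGetD_natCast]
      by_cases he : dA h stores m = 1000000
      · rw [if_pos he]
        by_cases hcmp : stores.getD m 0 < stores.getD k0 0
        · rw [if_pos hcmp]
          dsimp only
          rw [if_neg (by omega)]
          left
          refine ⟨he, fun i hi => ?_, fun k hk => by cases hk; omega, by intro hx; cases hx⟩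
          rcases Nat.lt_or_ge i m with hc | hc
          · exact hall i hc
          · have : i = m := by omega
            subst this; omega
        · rw [if_neg hcmp]
          dsimp only
          rw [if_neg (by omega)]
          left
          refine ⟨rfl, fun i hi => ?_, fun k hk => by cases hk; omega, by intro hx; cases hx⟩
          rcases Nat.lt_or_ge i m with hc | hc
          · exact hall i hc
          · have : i = m := by omega
            subst this; omega
      · rw [if_neg he]
        dsimp only
        by_cases hlt : dA h stores m < 1000000
        · rw [if_pos hlt]
          right
          refine ⟨m, by omega, hm, rfl, rfl, hlt, fun i hi => ?_⟩
          rcases Nat.lt_or_ge i m with hc | hc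
          · have := hall i hc; left; omega
          · have : i = m := by omega
            subst this; right; exact ⟨rfl, le_refl _⟩
        · rw [if_neg hlt]
          left
          refine ⟨rfl, fun i hi => ?_, fun k hk => by cases hk; omega, by intro hx; cases hx⟩
          rcases Nat.lt_or_ge i m with hc | hc
          · exact hall i hc
          · have : i = m := by omega
            subst this; omega
  · simp only at hkey hv ⊢
    subst hkey
    rw [innerStep_some]
    simp only [hkj_eq h stores m hm, PySem.List.pyGetD_natCast]
    by_cases he : dA h stores m = v
    · rw [if_pos he]
      by_cases hcmp : stores.getD m 0 < stores.getD k 0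
      · rw [if_pos hcmp]
        dsimp only
        rw [if_neg (by omega)]
        right
        refine ⟨m, by omega, hm, rfl, by omega, by omega, fun i hi => ?_⟩
        rcases Nat.lt_or_ge i m with hc | hc
        · rcases hmin i hc with hlt2 | ⟨heq2, hle2⟩
          · left; omega
          · right; exact ⟨by omega, by omega⟩
        · have : i = m := by omega
          subst this; right; exact ⟨by omega, le_refl _⟩
      · rw [if_neg hcmp]
        dsimp only
        rw [if_neg (by omega)]
        right
        refine ⟨k, by omega, hkn, rfl, hv, hvlt, fun i hi => ?_⟩
        rcases Nat.lt_or_ge i m with hc | hc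
        · exact hmin i hc
        · have : i = m := by omega
          subst this; right; exact ⟨by omega, by omega⟩
    · rw [if_neg he]
      dsimp only
      by_cases hlt : dA h stores m < v
      · rw [if_pos hlt]
        right
        refine ⟨m, by omega, hm, rfl, rfl, by omega, fun i hi => ?_⟩
        rcases Nat.lt_or_ge i m with hc | hc
        · rcases hmin i hc with hlt2 | ⟨heq2, hle2⟩ <;> left <;> omega
        · have : i = m := by omega
          subst this; right; exact ⟨rfl, le_refl _⟩
      · rw [if_neg hlt]
        right
        refine ⟨k, by omega, hkn, rfl, hv, hvlt, fun i hi => ?_⟩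
        rcases Nat.lt_or_ge i m with hc | hc
        · exact hmin i hc
        · have : i = m := by omega
          subst this; left; omega

lemma loop_inv (stores : List Int) (h : Int) (key0 : Option Nat)
    (hkb0 : ∀ k, key0 = some k → k < stores.length)
    (hgf : key0 = none → GoodFirst h stores) :
    ∀ m, m ≤ stores.length →
      ALoopInv stores h key0 m
        ((List.range m).foldl (innerStep stores (distList h stores)) (1000000, key0)) := by
  intro m
  induction m with
  | zero =>
    intro _
    left
    exact ⟨rfl, fun i hi => absurd hi (by omega), hkb0,
      fun hn => ⟨hn, fun i hi => absurd hi (by omega)⟩⟩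
  | succ m ih =>
    intro hm
    rw [List.range_succ, List.foldl_append, List.foldl_cons, List.foldl_nil]
    exact inv_step stores h key0 m (by omega) hgf _ (ih (by omega))

lemma dslen (h : Int) (stores : List Int) : (distList h stores).length = stores.length := by
  rw [distList_eq, List.length_map]

lemma mem_dA (stores : List Int) (s : Int) (hs : s ∈ stores) :
    ∃ i, i < stores.length ∧ stores.getD i 0 = s := by
  obtain ⟨i, hi, he⟩ := List.mem_iff_getElem.mp hs
  exact ⟨i, hi, by rw [List.getD_eq_getElem _ _ hi]; exact he⟩

lemma houseLoop_near (stores : List Int) (h : Int) (key0 : Option Nat)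
    (hkb0 : ∀ k, key0 = some k → k < stores.length)
    (hgf : key0 = none → GoodFirst h stores)
    (hnear : ∃ s ∈ stores, pyAbs (h - s) < 1000000) :
    ∃ k, (houseLoop stores (distList h stores) (1000000, key0)).2 = some k ∧
      k < stores.length ∧ IsBest stores h (stores.getD k 0) := by
  unfold houseLoop
  rw [dslen]
  have hinv := loop_inv stores h key0 hkb0 hgf stores.length le_rfl
  rcases hinv with ⟨_, hall, _, _⟩ | ⟨k, _, hkn, hkey, hv, _, hmin⟩
  · exfalso
    obtain ⟨s, hs, hlt⟩ := hnear
    obtain ⟨i, hi, he⟩ := mem_dA stores s hs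
    have := hall i hi
    unfold dA at this
    rw [he] at this
    omega
  · refine ⟨k, hkey, hkn, ?_, ?_⟩
    · rw [List.getD_eq_getElem _ _ hkn]; exact List.getElem_mem hkn
    · intro s hs
      obtain ⟨i, hi, he⟩ := mem_dA stores s hs
      have hmi := hmin i hi
      unfold dA at hmi hv
      rw [he] at hmi
      rcases hmi with h1 | ⟨h1, h2⟩
      · left; omega
      · right; exact ⟨by omega, h2⟩

lemma bsGo_spec (s : List Int) (h : Int)
    (hmono : ∀ i j, i ≤ j → j < s.length → s.getD i 0 ≤ s.getD j 0) :
    ∀ fuel lo hi, lo ≤ hi → hi ≤ s.length → hi - lo ≤ fuel →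
    (∀ i, i < lo → s.getD i 0 < h) →
    (∀ i, hi ≤ i → i < s.length → h ≤ s.getD i 0) →
      (∀ i, i < bsGo s h fuel lo hi → s.getD i 0 < h) ∧
      (∀ i, bsGo s h fuel lo hi ≤ i → i < s.length → h ≤ s.getD i 0) ∧
      bsGo s h fuel lo hi ≤ s.length := by
  intro fuel
  induction fuel with
  | zero => intro lo hi h1 h2 h3 hl hr
            have he : lo = hi := by omega
            subst he
            exact ⟨hl, by simpa [bsGo] using hr, by simp [bsGo]; omega⟩
  | succ fuel ih =>
    intro lo hi h1 h2 h3 hl hr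
    by_cases hlt : lo < hi
    · simp only [bsGo, hlt, if_true, PySem.List.pyGetD_natCast]
      by_cases hc : s.getD ((lo + hi) / 2) 0 < h
      · simp only [hc, if_true]
        exact ih ((lo + hi) / 2 + 1) hi (by omega) h2 (by omega)
          (fun i hi2 => lt_of_le_of_lt (hmono i ((lo+hi)/2) (by omega) (by omega)) hc) hr
      · simp only [hc, if_false]
        push_neg at hc
        exact ih lo ((lo + hi) / 2) (by omega) (by omega) (by omega) hl
          (fun i hi2 hi3 => le_trans hc (hmono ((lo+hi)/2) i hi2 hi3))
    · have he : lo = hi := by omega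
      subst he
      simp only [bsGo, hlt, if_false]
      exact ⟨hl, hr, by omega⟩

lemma sortedS_mono (stores : List Int) :
    ∀ i j, i ≤ j → j < (PySem.List.sorted stores (fun x => x) false).length →
      (PySem.List.sorted stores (fun x => x) false).getD i 0 ≤
      (PySem.List.sorted stores (fun x => x) false).getD j 0 := by
  intro i j hij hj
  rw [List.getD_eq_getElem _ _ (by omega), List.getD_eq_getElem _ _ hj]
  exact PySem.List.sorted_id_getElem_mono stores hij hj

lemma nearestOf_isBest (stores : List Int) (h : Int) (hne : stores ≠ []) :
    IsBest stores h (nearestOf (PySem.List.sorted stores (fun x => x) false) h) := by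
  set s := PySem.List.sorted stores (fun x => x) false with hs
  have hperm := PySem.List.sorted_perm stores (fun x => x) false
  have hlen : s.length = stores.length := hperm.length_eq
  have hslen : 0 < s.length := by
    rw [hlen]; exact List.length_pos_of_ne_nil hne
  have hmem : ∀ x, x ∈ s ↔ x ∈ stores := fun x => PySem.List.mem_sorted stores _ false x
  have hmono := sortedS_mono stores
  rw [← hs] at hmono
  obtain ⟨hlo1, hlo2, hlo3⟩ := bsGo_spec s h hmono (s.length - 0) 0 s.length
    (by omega) le_rfl (by omega) (fun i hi1 => absurd hi1 (by omega)) (fun i hi1 hi2 => absurd hi1 (by omega))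
  set lo := bsGo s h (s.length - 0) 0 s.length with hlodef
  have getD_mem : ∀ i, i < s.length → s.getD i 0 ∈ stores := by
    intro i hi
    rw [List.getD_eq_getElem _ _ hi]
    exact (hmem _).mp (List.getElem_mem hi)
  have mem_getD : ∀ x ∈ stores, ∃ i, i < s.length ∧ s.getD i 0 = x := by
    intro x hx
    obtain ⟨i, hi, he⟩ := List.mem_iff_getElem.mp ((hmem x).mpr hx)
    exact ⟨i, hi, by rw [List.getD_eq_getElem _ _ hi]; exact he⟩
  simp only [nearestOf, bsLoop, ← hs, ← hlodef]
  by_cases h0 : lo = 0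
  · rw [if_pos h0]
    rw [PySem.List.pyGetD_zero]
    have hgz : s.getD 0 0 ∈ stores := getD_mem 0 hslen
    have hh : h ≤ s.getD 0 0 := hlo2 0 (by omega) hslen
    refine ⟨hgz, ?_⟩
    intro t ht
    obtain ⟨i, hi, he⟩ := mem_getD t ht
    have h1 : s.getD 0 0 ≤ s.getD i 0 := hmono 0 i (by omega) hi
    have h2 : h ≤ s.getD i 0 := hlo2 i (by omega) hi
    rw [← he]
    simp only [pyAbs]
    split_ifs <;> omega
  · by_cases hL : lo = s.length
    · rw [if_neg h0, if_pos hL]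
      have hnil : s ≠ [] := by intro he; rw [he] at hslen; simp at hslen
      rw [PySem.List.pyGetD_neg_one s 0 hnil, List.getLast_eq_getElem]
      have hglast : s[s.length - 1] = s.getD (s.length - 1) 0 := by
        rw [List.getD_eq_getElem _ _ (by omega)]
      rw [hglast]
      have hh : s.getD (s.length - 1) 0 < h := hlo1 _ (by omega)
      refine ⟨getD_mem _ (by omega), ?_⟩
      intro t ht
      obtain ⟨i, hi, he⟩ := mem_getD t ht
      have h1 : s.getD i 0 ≤ s.getD (s.length - 1) 0 := hmono i (s.length - 1) (by omega) (by omega)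
      have h2 : s.getD i 0 < h := hlo1 i (by omega)
      rw [← he]
      simp only [pyAbs]
      split_ifs <;> omega
    · rw [if_neg h0, if_neg hL]
      have hcast1 : ((lo : Int) - 1) = (((lo - 1 : Nat)) : Int) := by omega
      rw [hcast1, PySem.List.pyGetD_natCast, PySem.List.pyGetD_natCast]
      have hleft : s.getD (lo - 1) 0 < h := hlo1 _ (by omega)
      have hright : h ≤ s.getD lo 0 := hlo2 _ le_rfl (by omega)
      have key : ∀ c, c = s.getD (lo - 1) 0 ∨ c = s.getD lo 0 →
          (c = s.getD (lo - 1) 0 → h - s.getD (lo - 1) 0 ≤ s.getD lo 0 - h) →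
          (c = s.getD lo 0 → s.getD lo 0 - h < h - s.getD (lo - 1) 0) →
          IsBest stores h c := by
        intro c hcm hc1 hc2
        have hcmem : c ∈ stores := by
          rcases hcm with rfl | rfl
          · exact getD_mem _ (by omega)
          · exact getD_mem _ (by omega)
        refine ⟨hcmem, ?_⟩
        intro t ht
        obtain ⟨i, hi, he⟩ := mem_getD t ht
        rw [← he]
        by_cases hil : i < lo
        · have h1 : s.getD i 0 ≤ s.getD (lo - 1) 0 := hmono i (lo - 1) (by omega) (by omega)
          have h2 : s.getD i 0 < h := hlo1 i (by omega)
          rcases hcm with rfl | rfl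
          · simp only [pyAbs]; split_ifs <;> omega
          · have := hc2 rfl; simp only [pyAbs]; split_ifs <;> omega
        · have h1 : s.getD lo 0 ≤ s.getD i 0 := hmono lo i (by omega) hi
          have h2 : h ≤ s.getD i 0 := hlo2 i (by omega) hi
          rcases hcm with rfl | rfl
          · have := hc1 rfl; simp only [pyAbs]; split_ifs <;> omega
          · simp only [pyAbs]; split_ifs <;> omega
      by_cases hch : h - s.getD (lo - 1) 0 ≤ s.getD lo 0 - h
      · simp only [hch, if_true]
        exact key _ (Or.inl rfl) (fun _ => hch) (fun hcc => by omega)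
      · simp only [hch, if_false]
        exact key _ (Or.inr rfl) (fun hcc => by omega) (fun _ => by omega)

lemma isBest_unique {stores : List Int} {h r₁ r₂ : Int}
    (h₁ : IsBest stores h r₁) (h₂ : IsBest stores h r₂) : r₁ = r₂ := by
  rcases h₁ with ⟨m₁, p₁⟩
  rcases h₂ with ⟨m₂, p₂⟩
  rcases p₁ r₂ m₂ with h' | ⟨he, hle⟩ <;> rcases p₂ r₁ m₁ with h'' | ⟨he', hle'⟩ <;> omega

def AStep (stores houses : List Int) (distance : PySem.Dict Int (List Int))
    (st : List Int × Option Nat) (l : Nat) : List Int × Option Nat :=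
  let output := st.1
  let h := PySem.List.pyGetD houses (l : Int) 0
  let k := distance.getD h []
  let r := houseLoop stores k (PySem.List.pyGetD output (l : Int) 0, st.2)
  let finalv :=
    match r.2 with
    | some key => PySem.List.pyGetD stores (key : Int) 0
    | none => 0
  (output.set l finalv, r.2)

lemma solution_eq (stores houses : List Int) :
    solution stores houses =
      ((List.range houses.length).foldl
        (AStep stores houses (houses.foldl (fun d h => d.insert h (distList h stores)) PySem.Dict.empty))
        (List.replicate houses.length 1000000, none)).1 := rfl

lemma getD_foldl_not_mem {f : Int → List Int} {t : List Int} {x : Int}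
    (d : PySem.Dict Int (List Int)) (hx : x ∉ t) :
    (t.foldl (fun d h' => d.insert h' (f h')) d).getD x [] = d.getD x [] := by
  induction t generalizing d with
  | nil => rfl
  | cons z u ih =>
    simp only [List.foldl_cons]
    rw [ih _ (by simp_all), PySem.Dict.getD_insert_of_ne _ _ _ (by simp_all : x ≠ z)]

lemma dict_getD_mem {f : Int → List Int} {houses : List Int} {x : Int}
    (d : PySem.Dict Int (List Int)) (hmem : x ∈ houses) :
    (houses.foldl (fun d h' => d.insert h' (f h')) d).getD x [] = f x := by
  induction houses generalizing d with
  | nil => cases hmem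
  | cons y t ih =>
    simp only [List.foldl_cons]
    by_cases hx : x ∈ t
    · exact ih _ hx
    · have hxy : x = y := by rcases hmem with _ | h; rfl; exact absurd ‹x ∈ t› hx
      subst hxy
      rw [getD_foldl_not_mem _ hx, PySem.Dict.getD_insert_self]

lemma take_succ_getD (xs : List Int) (l : Nat) (hl : l < xs.length) :
    xs.take (l + 1) = xs.take l ++ [xs.getD l 0] := by
  rw [List.take_succ, List.getElem?_eq_getElem hl, List.getD_eq_getElem _ _ hl]
  rfl

lemma getD_append_len (xs ys : List Int) (d : Int) :
    (xs ++ ys).getD xs.length d = ys.getD 0 d := by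
  simp [List.getD, List.getElem?_append_right]

lemma set_append_len (xs ys : List Int) (v : Int) :
    (xs ++ ys).set xs.length v = xs ++ ys.set 0 v := by
  induction xs with
  | nil => rfl
  | cons a t ih => simp [List.set, ih]

-- the outer-loop invariant: after l houses, output holds B's answers on the prefix
lemma outer_inv (stores houses : List Int) (n : Nat) (hn : n = houses.length)
    (hgf0 : 0 < houses.length → GoodFirst (houses.getD 0 0) stores)
    (hnear : ∀ l, l < houses.length → ∃ s ∈ stores, pyAbs (houses.getD l 0 - s) < 1000000) :
    ∀ l, l ≤ n →
      (((List.range l).foldl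
          (AStep stores houses (houses.foldl (fun d h => d.insert h (distList h stores)) PySem.Dict.empty))
          (List.replicate n 1000000, none)).1 =
        (houses.take l).map (fun h => nearestOf (PySem.List.sorted stores (fun x => x) false) h)
          ++ List.replicate (n - l) 1000000) ∧
      ((((List.range l).foldl
          (AStep stores houses (houses.foldl (fun d h => d.insert h (distList h stores)) PySem.Dict.empty))
          (List.replicate n 1000000, none)).2 = none → l = 0) ∧
       (∀ k, ((List.range l).foldl
          (AStep stores houses (houses.foldl (fun d h => d.insert h (distList h stores)) PySem.Dict.empty))
          (List.replicate n 1000000, none)).2 = some k → k < stores.length)) := by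
  intro l
  induction l with
  | zero =>
    intro _
    refine ⟨by simp, fun _ => rfl, fun k hk => by cases hk⟩
  | succ l ih =>
    intro hl
    obtain ⟨hout, hnone, hkb⟩ := ih (by omega)
    have hln : l < houses.length := by omega
    rw [List.range_succ, List.foldl_append, List.foldl_cons, List.foldl_nil]
    set st := ((List.range l).foldl
        (AStep stores houses (houses.foldl (fun d h => d.insert h (distList h stores)) PySem.Dict.empty))
        (List.replicate n 1000000, none)) with hst
    have hh : PySem.List.pyGetD houses ((l : Nat) : Int) 0 = houses.getD l 0 := by
      rw [PySem.List.pyGetD_natCast]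
    have hhm : houses.getD l 0 ∈ houses := by
      rw [List.getD_eq_getElem _ _ hln]; exact List.getElem_mem hln
    have hdict : (houses.foldl (fun d h => d.insert h (distList h stores)) PySem.Dict.empty).getD
        (houses.getD l 0) [] = distList (houses.getD l 0) stores :=
      dict_getD_mem _ hhm
    have htklen : ((houses.take l).map
        (fun h => nearestOf (PySem.List.sorted stores (fun x => x) false) h)).length = l := by
      simp [List.length_take]; omega
    have hget : PySem.List.pyGetD st.1 ((l : Nat) : Int) 0 = 1000000 := by
      rw [PySem.List.pyGetD_natCast, hout]
      have := getD_append_len ((houses.take l).map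
        (fun h => nearestOf (PySem.List.sorted stores (fun x => x) false) h))
        (List.replicate (n - l) 1000000) 0
      rw [htklen] at this
      rw [this]
      have hpos : 0 < n - l := by omega
      obtain ⟨m, hm⟩ : ∃ m, n - l = m + 1 := ⟨n - l - 1, by omega⟩
      rw [hm]; rfl
    have hgf : st.2 = none → GoodFirst (houses.getD l 0) stores := by
      intro hn2
      have hl0 : l = 0 := hnone hn2
      subst hl0
      exact hgf0 (by omega)
    obtain ⟨key, hkey, hklen, hbest⟩ := houseLoop_near stores (houses.getD l 0) st.2
      hkb hgf (hnear l hln)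
    have hne : stores ≠ [] := by
      obtain ⟨s, hs, _⟩ := hnear l hln
      intro he; rw [he] at hs; cases hs
    have hval : stores.getD key 0 =
        nearestOf (PySem.List.sorted stores (fun x => x) false) (houses.getD l 0) :=
      isBest_unique hbest (nearestOf_isBest stores (houses.getD l 0) hne)
    have hastep : AStep stores houses
        (houses.foldl (fun d h => d.insert h (distList h stores)) PySem.Dict.empty) st l =
        (st.1.set l (PySem.List.pyGetD stores ((key : Nat) : Int) 0), some key) := by
      unfold AStep
      simp only [hh, hdict, hget, hkey]
    rw [hastep]
    simp only [PySem.List.pyGetD_natCast]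
    refine ⟨?_, fun hx => ?_, fun k hk => ?_⟩
    · rw [hval, hout]
      have hset := set_append_len ((houses.take l).map
          (fun h => nearestOf (PySem.List.sorted stores (fun x => x) false) h))
          (List.replicate (n - l) 1000000)
          (nearestOf (PySem.List.sorted stores (fun x => x) false) (houses.getD l 0))
      rw [htklen] at hset
      rw [hset]
      obtain ⟨m, hm⟩ : ∃ m, n - l = m + 1 := ⟨n - l - 1, by omega⟩
      rw [hm, List.replicate_succ, List.set_cons_zero,
        take_succ_getD houses l hln, List.map_append]
      have hm' : n - (l + 1) = m := by omega
      rw [hm']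
      simp
    · cases hx
    · cases hk; exact hklen

-- ===== VERDICT (by name: the statement is the Claim_ definition above) =====
theorem solution_spec : Claim_equal_solution := by
  intro stores houses _ hpre
  show solution stores houses = solution_alt stores houses
  rcases hpre with he | ⟨hg, hnear⟩
  · subst he; rfl
  · have := (outer_inv stores houses houses.length rfl (fun _ => hg) hnear
      houses.length le_rfl).1
    rw [solution_eq, this]
    simp [solution_alt]
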